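-- pv_equiv track=rewrite | github.com/attaf-riski/semester-1-daspro | 8/responsi/24060121120005_ResponsiA2_Prak-8.py | is_equal
-- ===== SOURCE A (Python) =====
-- def first_elmnt(L):
--     if not L == []:
--         return L[0]
--
-- def tail(L):
--     if not L == []:
--         return L[1:]
--
-- def is_empty(L):
--     return L == []
--
-- def is_equal(L1,L2):
--     if nb_elmnt(L1) == nb_elmnt(L2):
--         if is_empty(L1) and is_empty(L2):
--             return True
--         elif first_elmnt(L1) == first_elmnt(L2):
--             return True and is_equal(tail(L1),tail(L2))
--         else:
--             return False
--     else:
--         return False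
--
-- def nb_elmnt(L):
--     if is_empty(L): #basis 0
--         return 0
--     else:
--         return 1 + nb_elmnt(tail(L))
-- ===== SOURCE B (Python) =====
-- def is_equal(L1, L2):
--     if len(L1) != len(L2):
--         return False
--     for a, b in zip(L1, L2):
--         if not (a == b):
--             return False
--     return True
-- ===== Notes on version B (the rewrite author's own statement) =====
-- stated objective: simpler
-- what changed: Replaces recursion over tail slices with a recursive length count per call by a single length check followed by one linear pass over zipped pairs.
import Mathlib
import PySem

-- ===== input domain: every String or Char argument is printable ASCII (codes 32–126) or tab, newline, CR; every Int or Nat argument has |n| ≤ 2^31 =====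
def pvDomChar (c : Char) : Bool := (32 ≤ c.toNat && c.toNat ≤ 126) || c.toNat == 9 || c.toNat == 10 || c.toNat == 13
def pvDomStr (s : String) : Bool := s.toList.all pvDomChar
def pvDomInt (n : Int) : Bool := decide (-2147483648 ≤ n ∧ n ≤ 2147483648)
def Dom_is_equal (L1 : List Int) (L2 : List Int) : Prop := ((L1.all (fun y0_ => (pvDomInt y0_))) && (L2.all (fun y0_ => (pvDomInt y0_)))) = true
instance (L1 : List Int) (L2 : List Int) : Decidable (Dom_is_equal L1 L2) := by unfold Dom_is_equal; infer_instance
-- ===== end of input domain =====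

-- B replaces A's tail-slice recursion (with a full recursive length count per call) by
-- one length check plus a single linear pass over zipped pairs; same return value everywhere.
-- ===== PORT A =====
-- first_elmnt: returns L[0], or None for the empty list
def first_elmnt (L : List Int) : Option Int :=
  if !(L == []) then L[0]? else none

-- tail: Python returns L[1:] for nonempty L and None otherwise; in A it is only ever
-- applied to nonempty lists, so we port it as the slice L[1:] (= drop 1), exact there.
def tailA (L : List Int) : List Int := L.drop 1

def is_empty (L : List Int) : Bool := L == []

def nb_elmnt : List Int → Int
  | [] => 0
  | _ :: t => 1 + nb_elmnt t

theorem nb_elmnt_eq_length (L : List Int) : nb_elmnt L = (L.length : Int) := by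
  induction L with
  | nil => simp [nb_elmnt]
  | cons a t ih => simp [nb_elmnt, ih]; omega

def is_equal (L1 : List Int) (L2 : List Int) : Bool :=
  if nb_elmnt L1 = nb_elmnt L2 then
    if is_empty L1 && is_empty L2 then true
    else if first_elmnt L1 == first_elmnt L2 then
      true && is_equal (tailA L1) (tailA L2)
    else false
  else false
termination_by L1.length
decreasing_by
  simp only [tailA, List.length_drop]
  cases L1 with
  | nil =>
    exfalso
    simp_all [is_empty, nb_elmnt_eq_length]
    cases L2 <;> simp_all <;> omega
  | cons a t => simp

-- ===== PORT B =====
def is_equal_alt (L1 : List Int) (L2 : List Int) : Bool :=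
  if L1.length != L2.length then false
  else (L1.zip L2).all (fun p => p.1 == p.2)

-- ===== PRECONDITION & SPEC =====
def Spec_is_equal (L1 : List Int) (L2 : List Int) (out : Bool) : Prop := out = is_equal_alt L1 L2
instance (L1 : List Int) (L2 : List Int) (out : Bool) : Decidable (Spec_is_equal L1 L2 out) := by unfold Spec_is_equal; infer_instance

-- ===== CLAIM (what is proved, stated in full; the proofs are below) =====
def Claim_equal_is_equal : Prop := ∀ (L1 : List Int) (L2 : List Int), Dom_is_equal L1 L2 → Spec_is_equal L1 L2 (is_equal L1 L2)

-- ===== LEMMAS AND PROOFS =====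

-- ===== VERDICT (by name: the statement is the Claim_ definition above) =====
theorem eq_of_lengths (L1 L2 : List Int) :
    is_equal L1 L2 = is_equal_alt L1 L2 := by
  induction L1 generalizing L2 with
  | nil =>
    cases L2 with
    | nil => rw [is_equal]; simp [is_empty, is_equal_alt, nb_elmnt]
    | cons b t2 =>
      rw [is_equal]
      simp [is_equal_alt, nb_elmnt_eq_length]
      omega
  | cons a t1 ih =>
    cases L2 with
    | nil =>
      rw [is_equal]
      simp [is_equal_alt, nb_elmnt_eq_length]
      omega
    | cons b t2 =>
      rw [is_equal]
      simp only [nb_elmnt_eq_length, is_empty, first_elmnt, tailA,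
        is_equal_alt, List.length_cons, List.zip_cons_cons, List.all_cons]
      by_cases hlen : t1.length = t2.length
      · by_cases hab : a = b
        · simp [hab, ih t2, is_equal_alt, hlen]
        · simp [hlen, hab]
      · have : ¬ ((t1.length : Int) + 1 = (t2.length : Int) + 1) := by omega
        simp [hlen, this]

theorem is_equal_spec : Claim_equal_is_equal := by
  intro L1 L2 _
  unfold Spec_is_equal
  exact eq_of_lengths L1 L2
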